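-- pv_equiv track=rewrite | github.com/Yloganathan/advent-2024 | 9.py | get_free_spaces
-- ===== SOURCE A (Python) =====
-- def get_free_spaces(memory_array):
--     consecutive_free_space = []
--     start_index = None
--     for i in range(len(memory_array)):
--         if memory_array[i] == '.':
--             if start_index is None:
--                 start_index = i
--         else:
--             if start_index is not None:
--                 length = i - start_index
--                 consecutive_free_space.append((start_index, length))
--                 start_index = None
--     if start_index is not None:
--         consecutive_free_space.append((start_index, len(memory_array) - start_index))
--     return consecutive_free_space
-- ===== SOURCE B (Python) =====
-- def get_free_spaces(memory_array):
--     starts = [i for i, (c, p) in enumerate(zip(memory_array, [''] + memory_array))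
--               if c == '.' and p != '.']
--     ends = [i + 1 for i, (c, nx) in enumerate(zip(memory_array, memory_array[1:] + ['']))
--             if c == '.' and nx != '.']
--     return [(s, e - s) for s, e in zip(starts, ends)]
-- ===== Notes on version B (the rewrite author's own statement) =====
-- stated objective: alternative
-- what changed: Replaces the single-pass state machine (Optional start_index with a trailing flush) by three staged passes: one boundary-detection pass over the array zipped with its left shift collects run starts, an independent pass over the array zipped with its right shift collects run ends, and the two lists are zipped into (start, length) pairs.
import Mathlib
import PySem

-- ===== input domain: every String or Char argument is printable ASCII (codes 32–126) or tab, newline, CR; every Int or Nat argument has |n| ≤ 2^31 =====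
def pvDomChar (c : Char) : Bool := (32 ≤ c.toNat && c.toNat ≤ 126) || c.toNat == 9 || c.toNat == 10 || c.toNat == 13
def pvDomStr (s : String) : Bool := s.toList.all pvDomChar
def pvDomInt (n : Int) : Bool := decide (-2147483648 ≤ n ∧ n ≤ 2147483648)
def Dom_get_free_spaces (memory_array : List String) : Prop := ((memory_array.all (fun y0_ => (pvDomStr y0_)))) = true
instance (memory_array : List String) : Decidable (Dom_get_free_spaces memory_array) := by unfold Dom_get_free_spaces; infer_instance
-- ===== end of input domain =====

-- B replaces A's single-pass state machine by three staged passes: detect run starts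
-- (element is '.' and its left neighbour is not), detect run ends (element is '.' and its
-- right neighbour is not), and zip the two lists into (start, length) pairs; objective: alternative.

-- ===== PORT A =====
-- the loop body of A: state = (consecutive_free_space, start_index)
def gfsStepA (memory_array : List String) (s : List (Int × Int) × Option Int) (i : Int) :
    List (Int × Int) × Option Int :=
  if PySem.List.pyGetD memory_array i "" = "." then
    match s.2 with
    | none => (s.1, some i)
    | some _ => s
  else
    match s.2 with
    | none => s
    | some st0 => (s.1 ++ [(st0, i - st0)], none)

def get_free_spaces (memory_array : List String) : List (Int × Int) :=
  let n : Int := memory_array.length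
  let st := (PySem.List.pyRange 0 n 1).foldl (gfsStepA memory_array) ([], none)
  match st.2 with
  | none => st.1
  | some st0 => st.1 ++ [(st0, n - st0)]

-- ===== PORT B =====
-- starts = [i for i,(c,p) in enumerate(zip(m, ['']+m)) if c=='.' and p!='.']
-- ends   = [i+1 for i,(c,nx) in enumerate(zip(m, m[1:]+[''])) if c=='.' and nx!='.']
-- return [(s, e-s) for s,e in zip(starts, ends)]
def get_free_spaces_alt (memory_array : List String) : List (Int × Int) :=
  let starts := ((PySem.List.enumerate (memory_array.zip ("" :: memory_array)) 0).filter
      (fun q => q.2.1 == "." && !(q.2.2 == "."))).map (fun q => q.1)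
  let ends := ((PySem.List.enumerate
        (memory_array.zip (PySem.List.slice memory_array (some 1) none ++ [""])) 0).filter
      (fun q => q.2.1 == "." && !(q.2.2 == "."))).map (fun q => q.1 + 1)
  (starts.zip ends).map (fun q => (q.1, q.2 - q.1))

-- ===== PRECONDITION & SPEC =====
def Spec_get_free_spaces (memory_array : List String) (out : List (Int × Int)) : Prop := out = get_free_spaces_alt memory_array
instance (memory_array : List String) (out : List (Int × Int)) : Decidable (Spec_get_free_spaces memory_array out) := by unfold Spec_get_free_spaces; infer_instance

-- ===== CLAIM (what is proved, stated in full; the proofs are below) =====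
def Claim_equal_get_free_spaces : Prop := ∀ (memory_array : List String), Dom_get_free_spaces memory_array → Spec_get_free_spaces memory_array (get_free_spaces memory_array)

-- ===== LEMMAS AND PROOFS =====

-- proof-side intermediate: the runs of the array, as a recursion on maximal equal groups
def gfsGo (off : Int) : List String → List (Int × Int)
  | [] => []
  | x :: xs =>
    let run := xs.takeWhile (fun y => y == x)
    let k : Int := (run.length : Int) + 1
    let rest := xs.dropWhile (fun y => y == x)
    (if x = "." then [(off, k)] else []) ++ gfsGo (off + k) rest
termination_by l => l.length
decreasing_by
  exact Nat.lt_succ_of_le (List.length_dropWhile_le _ _)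

theorem gfsGo_nil (off : Int) : gfsGo off [] = [] := by rw [gfsGo]

theorem gfsGo_cons (off : Int) (x : String) (xs : List String) :
    gfsGo off (x :: xs) =
      (if x = "." then [(off, ((xs.takeWhile (fun y => y == x)).length : Int) + 1)] else [])
        ++ gfsGo (off + ((xs.takeWhile (fun y => y == x)).length : Int) + 1)
             (xs.dropWhile (fun y => y == x)) := by
  rw [gfsGo]; ring_nf

-- A's loop body, viewed on (index, value) pairs
def gfsStepE (s : List (Int × Int) × Option Int) (p : Int × String) :
    List (Int × Int) × Option Int :=
  if p.2 = "." then
    match s.2 with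
    | none => (s.1, some p.1)
    | some _ => s
  else
    match s.2 with
    | none => s
    | some st0 => (s.1 ++ [(st0, p.1 - st0)], none)

-- A's trailing flush at end index e
def gfsFlush (s : List (Int × Int) × Option Int) (e : Int) : List (Int × Int) :=
  match s.2 with
  | none => s.1
  | some st0 => s.1 ++ [(st0, e - st0)]

-- skipping a non-'.' head only advances the offset
theorem gfsGo_nondot (ys : List String) (y : String) (s : Int) (hy : y ≠ ".") :
    gfsGo s (y :: ys) = gfsGo (s + 1) ys := by
  cases ys with
  | nil => simp [gfsGo_cons, gfsGo_nil, hy]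
  | cons z zs =>
    by_cases hz : z = y
    · subst hz
      rw [gfsGo_cons, gfsGo_cons]
      simp only [hy, if_false, List.takeWhile, List.dropWhile, beq_self_eq_true,
        List.length_cons, List.nil_append]
      congr 1
      push_cast; ring
    · have hz' : (z == y) = false := by simp [hz]
      rw [gfsGo_cons]
      simp only [hy, if_false, List.takeWhile, List.dropWhile, hz',
        List.length_nil, Int.natCast_zero, add_zero, List.nil_append]

-- the main invariant for A: running A's loop over enumerate m s, then flushing at s + |m|,
-- equals the already-emitted acc followed by the run recursion — for both loop states.
theorem gfs_loop_eq (m : List String) :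
    (∀ (s : Int) (acc : List (Int × Int)),
      gfsFlush ((PySem.List.enumerate m s).foldl gfsStepE (acc, none)) (s + m.length)
        = acc ++ gfsGo s m)
    ∧
    (∀ (s s0 : Int) (acc : List (Int × Int)),
      gfsFlush ((PySem.List.enumerate m s).foldl gfsStepE (acc, some s0)) (s + m.length)
        = acc ++ [(s0, s + ((m.takeWhile (fun y => y == ".")).length : Int) - s0)]
            ++ gfsGo (s + ((m.takeWhile (fun y => y == ".")).length : Int))
                 (m.dropWhile (fun y => y == "."))) := by
  induction m with
  | nil =>
    constructor
    · intro s acc; simp [PySem.List.enumerate_nil, gfsFlush, gfsGo_nil]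
    · intro s s0 acc; simp [PySem.List.enumerate_nil, gfsFlush, gfsGo_nil]
  | cons x xs ih =>
    obtain ⟨ih1, ih2⟩ := ih
    have hlen : ∀ s : Int, s + ((xs.length + 1 : Nat) : Int) = (s + 1) + (xs.length : Int) := by
      intro s; push_cast; ring
    constructor
    · intro s acc
      by_cases hx : x = "."
      · subst hx
        rw [PySem.List.enumerate_cons]
        simp only [List.foldl_cons, gfsStepE, if_true, List.length_cons]
        rw [hlen s, ih2 (s + 1) s acc, gfsGo_cons]
        simp only [if_true, List.append_assoc]
        congr 2
        · congr 2; ring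
        · congr 1; ring
      · rw [PySem.List.enumerate_cons]
        simp only [List.foldl_cons, gfsStepE, hx, if_false, List.length_cons]
        rw [hlen s, ih1 (s + 1) acc, gfsGo_nondot xs x s hx]
    · intro s s0 acc
      by_cases hx : x = "."
      · subst hx
        rw [PySem.List.enumerate_cons]
        simp only [List.foldl_cons, gfsStepE, if_true, List.length_cons]
        rw [hlen s, ih2 (s + 1) s0 acc]
        simp only [List.takeWhile, List.dropWhile, beq_self_eq_true, List.length_cons,
          List.append_assoc]
        congr 2
        · congr 2; push_cast; ring
        · congr 1; push_cast; ring
      · have hx' : (x == ".") = false := by simp [hx]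
        rw [PySem.List.enumerate_cons]
        simp only [List.foldl_cons, gfsStepE, hx, if_false, List.length_cons]
        rw [hlen s, ih1 (s + 1) (acc ++ [(s0, s - s0)]), List.append_assoc]
        simp only [List.takeWhile, List.dropWhile, hx', List.length_nil, Int.natCast_zero,
          add_zero]
        rw [gfsGo_nondot xs x s hx, List.append_assoc]

-- proof-side structural form of B's starts pass (p = previous element, "" initially)
def pvSA (p : String) (s : Int) : List String → List Int
  | [] => []
  | x :: xs => (if x = "." ∧ p ≠ "." then [s] else []) ++ pvSA x (s + 1) xs

-- proof-side structural form of B's ends pass (lookahead at the next element)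
def pvEA (s : Int) : List String → List Int
  | [] => []
  | x :: xs => (if x = "." ∧ xs.headD "" ≠ "." then [s + 1] else []) ++ pvEA (s + 1) xs

-- B's starts comprehension IS pvSA
theorem bridgeS (m : List String) : ∀ (p : String) (s : Int),
    ((PySem.List.enumerate (m.zip (p :: m)) s).filter
        (fun q => q.2.1 == "." && !(q.2.2 == "."))).map (fun q => q.1) = pvSA p s m := by
  induction m with
  | nil => intro p s; simp [PySem.List.enumerate_nil, pvSA]
  | cons x xs ih =>
    intro p s
    rw [show (x :: xs).zip (p :: x :: xs) = (x, p) :: xs.zip (x :: xs) from rfl,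
      PySem.List.enumerate_cons]
    by_cases hx : x = "." <;> by_cases hp : p = "." <;>
      simp [pvSA, hx, hp, ih]

-- B's ends comprehension IS pvEA
theorem bridgeE (m : List String) : ∀ (s : Int),
    ((PySem.List.enumerate (m.zip (m.tail ++ [""])) s).filter
        (fun q => q.2.1 == "." && !(q.2.2 == "."))).map (fun q => q.1 + 1) = pvEA s m := by
  induction m with
  | nil => intro s; simp [PySem.List.enumerate_nil, pvEA]
  | cons x xs ih =>
    intro s
    rw [show (x :: xs).tail = xs from rfl,
      show (x :: xs).zip (xs ++ [""]) = (x, xs.headD "") :: xs.zip (xs.tail ++ [""]) from by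
        cases xs <;> rfl,
      PySem.List.enumerate_cons]
    by_cases hx : x = "." <;> by_cases hn : xs.head?.getD "" = "." <;>
      simp [pvEA, hx, hn, ih, List.headD_eq_head?_getD]

-- the previous element only matters when the head is '.'
theorem pvSA_prev (m : List String) (p q : String) (s : Int) (h : m.head? ≠ some ".") :
    pvSA p s m = pvSA q s m := by
  cases m with
  | nil => rfl
  | cons x xs =>
    have hx : x ≠ "." := by simpa using h
    simp [pvSA, hx]

-- main lemma: zipping the starts with the ends yields the run recursion,
-- both from a clean state (prev not '.') and inside a pending run started at s0.
theorem pv_zip_eq (m : List String) :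
    (∀ (s : Int) (p : String), p ≠ "." →
      ((pvSA p s m).zip (pvEA s m)).map (fun q => (q.1, q.2 - q.1)) = gfsGo s m)
    ∧
    (∀ (s s0 : Int), m.head? = some "." →
      ((s0 :: pvSA "." s m).zip (pvEA s m)).map (fun q => (q.1, q.2 - q.1))
        = (s0, s + ((m.takeWhile (fun y => y == ".")).length : Int) - s0)
            :: gfsGo (s + ((m.takeWhile (fun y => y == ".")).length : Int))
                 (m.dropWhile (fun y => y == "."))) := by
  induction m with
  | nil =>
    constructor
    · intro s p _; simp [pvSA, pvEA, gfsGo_nil]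
    · intro s s0 h; simp at h
  | cons x xs ih =>
    obtain ⟨ih1, ih2⟩ := ih
    constructor
    · intro s p hp
      by_cases hx : x = "."
      · subst hx
        simp only [pvSA, pvEA, hp, ne_eq, not_false_iff, and_true, if_true,
          List.singleton_append]
        by_cases hn : xs.headD "" = "."
        · -- run continues into xs
          have hhead : xs.head? = some "." := by
            cases xs with
            | nil => simp at hn
            | cons y ys => simpa using hn
          simp only [hn, not_true_eq_false, and_false, if_false, List.nil_append]
          rw [ih2 (s + 1) s hhead, gfsGo_cons]
          simp only [if_true, List.singleton_append]
          congr 1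
          · congr 1; ring
          · congr 1; ring
        · -- run of length 1
          simp only [hn, not_false_iff, and_true, if_true, List.singleton_append,
            List.zip_cons_cons, List.map_cons]
          cases xs with
          | nil =>
            simp [pvSA, pvEA, gfsGo_cons, gfsGo_nil]
          | cons y ys =>
            have hy : y ≠ "." := by simpa using hn
            rw [pvSA_prev (y :: ys) "." "x" (s + 1) (by simpa using hy),
              ih1 (s + 1) "x" (by decide), gfsGo_cons s "." (y :: ys)]
            have hy' : (y == (".":String)) = false := by simpa using hy
            have hty : ((y :: ys).takeWhile (fun z => z == (".":String))) = [] := by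
              simp [List.takeWhile, hy']
            have hdy : ((y :: ys).dropWhile (fun z => z == (".":String))) = y :: ys := by
              simp [List.dropWhile, hy']
            simp only [hty, hdy, List.length_nil, Int.natCast_zero, add_zero, if_true,
              List.singleton_append]
            congr 2; ring
      · -- head not '.': both passes skip it
        simp only [pvSA, pvEA, hx, false_and, if_false, List.nil_append]
        rw [gfsGo_nondot xs x s hx]
        exact ih1 (s + 1) x hx
    · intro s s0 hh
      have hx : x = "." := by simpa using hh
      subst hx
      have ht : ((("." : String) :: xs).takeWhile (fun y => y == ".")) =
          "." :: xs.takeWhile (fun y => y == ".") := by simp [List.takeWhile]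
      have hd : ((("." : String) :: xs).dropWhile (fun y => y == ".")) =
          xs.dropWhile (fun y => y == ".") := by simp [List.dropWhile]
      simp only [pvSA, pvEA, ne_eq, not_true_eq_false, and_false, if_false, List.nil_append]
      by_cases hn : xs.headD "" = "."
      · have hhead : xs.head? = some "." := by
          cases xs with
          | nil => simp at hn
          | cons y ys => simpa using hn
        simp only [hn, not_true_eq_false, and_false, if_false, List.nil_append]
        rw [ih2 (s + 1) s0 hhead, ht, hd]
        simp only [List.length_cons]
        congr 1
        · congr 1; push_cast; ring
        · congr 1; push_cast; ring
      · simp only [hn, not_false_iff, and_true, if_true, List.singleton_append,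
          List.zip_cons_cons, List.map_cons]
        cases xs with
        | nil =>
          simp [pvSA, pvEA, gfsGo_nil]
        | cons y ys =>
          have hy : y ≠ "." := by simpa using hn
          rw [pvSA_prev (y :: ys) "." "x" (s + 1) (by simpa using hy),
            ih1 (s + 1) "x" (by decide)]
          have hy' : (y == (".":String)) = false := by simpa using hy
          have hty : ((y :: ys).takeWhile (fun z => z == (".":String))) = [] := by
            simp [List.takeWhile, hy']
          have hdy : ((y :: ys).dropWhile (fun z => z == (".":String))) = y :: ys := by
            simp [List.dropWhile, hy']
          rw [ht, hd, hty, hdy]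
          simp only [List.length_cons, List.length_nil]
          congr 2

-- ===== VERDICT (by name: the statement is the Claim_ definition above) =====
theorem get_free_spaces_spec : Claim_equal_get_free_spaces := by
  intro m _
  show get_free_spaces m = get_free_spaces_alt m
  have h1 : get_free_spaces m
      = gfsFlush ((PySem.List.enumerate m 0).foldl gfsStepE ([], none)) (m.length : Int) := by
    rw [PySem.List.enumerate_eq_map_pyRange m "", List.foldl_map]
    rfl
  have hA : get_free_spaces m = gfsGo 0 m := by
    rw [h1]
    have := (gfs_loop_eq m).1 0 []
    simpa using this
  have hB : get_free_spaces_alt m = gfsGo 0 m := by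
    show (((((PySem.List.enumerate (m.zip ("" :: m)) 0).filter
        (fun q => q.2.1 == "." && !(q.2.2 == "."))).map (fun q => q.1)).zip
      (((PySem.List.enumerate (m.zip (PySem.List.slice m (some 1) none ++ [""])) 0).filter
        (fun q => q.2.1 == "." && !(q.2.2 == "."))).map (fun q => q.1 + 1))).map
      (fun q => (q.1, q.2 - q.1))) = gfsGo 0 m
    rw [PySem.List.slice_from_one, bridgeS m "" 0, bridgeE m 0]
    exact (pv_zip_eq m).1 0 "" (by decide)
  rw [hA, hB]
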